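-- pv_equiv track=rewrite | github.com/MacFall7/MacFall7-m87-governed-swarm | apps/api/app/governance/call_receipt.py | classify_effects
-- ===== SOURCE A (Python) =====
-- from enum import Enum
--
-- class EffectClass(str, Enum):
--     READ_ONLY = "READ_ONLY"
--     WRITE_LOCAL = "WRITE_LOCAL"
--     MODEL_INFERENCE = "MODEL_INFERENCE"
--     EXTERNAL_READ = "EXTERNAL_READ"
--     NETWORK_TRANSMIT = "NETWORK_TRANSMIT"
--     PERMISSION_CHANGE = "PERMISSION_CHANGE"
--     INTEGRATION_WIRE = "INTEGRATION_WIRE"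
--     SHELL_EXEC = "SHELL_EXEC"
--     SCHEMA_MODIFY = "SCHEMA_MODIFY"
--
-- EFFECT_TAG_TO_CLASS = {
--     "READ_REPO": EffectClass.READ_ONLY,
--     "READ_CONFIG": EffectClass.READ_ONLY,
--     "READ_SECRETS": EffectClass.READ_ONLY,
--     "COMPUTE": EffectClass.MODEL_INFERENCE,
--     "WRITE_PATCH": EffectClass.WRITE_LOCAL,
--     "RUN_TESTS": EffectClass.SHELL_EXEC,
--     "BUILD_ARTIFACT": EffectClass.SHELL_EXEC,
--     "CREATE_PR": EffectClass.INTEGRATION_WIRE,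
--     "MERGE": EffectClass.INTEGRATION_WIRE,
--     "DEPLOY": EffectClass.NETWORK_TRANSMIT,
--     "NETWORK_CALL": EffectClass.NETWORK_TRANSMIT,
--     "SEND_NOTIFICATION": EffectClass.NETWORK_TRANSMIT,
--     "OTHER": EffectClass.SHELL_EXEC,
-- }
--
-- def classify_effects(effects: list[str]) -> EffectClass:
--     """
--     Map M87 effect tags to the highest-risk GBE EffectClass.
--
--     Priority order (highest risk first):
--     NETWORK_TRANSMIT > INTEGRATION_WIRE > SHELL_EXEC > WRITE_LOCAL
--     > MODEL_INFERENCE > EXTERNAL_READ > READ_ONLY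
--     """
--     priority = [
--         EffectClass.NETWORK_TRANSMIT,
--         EffectClass.PERMISSION_CHANGE,
--         EffectClass.INTEGRATION_WIRE,
--         EffectClass.SHELL_EXEC,
--         EffectClass.SCHEMA_MODIFY,
--         EffectClass.WRITE_LOCAL,
--         EffectClass.MODEL_INFERENCE,
--         EffectClass.EXTERNAL_READ,
--         EffectClass.READ_ONLY,
--     ]
--     classes = {EFFECT_TAG_TO_CLASS.get(e, EffectClass.SHELL_EXEC) for e in effects}
--     for p in priority:
--         if p in classes:
--             return p
--     return EffectClass.READ_ONLY
-- ===== SOURCE B (Python) =====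
-- from enum import Enum
--
-- class EffectClass(str, Enum):
--     READ_ONLY = "READ_ONLY"
--     WRITE_LOCAL = "WRITE_LOCAL"
--     MODEL_INFERENCE = "MODEL_INFERENCE"
--     EXTERNAL_READ = "EXTERNAL_READ"
--     NETWORK_TRANSMIT = "NETWORK_TRANSMIT"
--     PERMISSION_CHANGE = "PERMISSION_CHANGE"
--     INTEGRATION_WIRE = "INTEGRATION_WIRE"
--     SHELL_EXEC = "SHELL_EXEC"
--     SCHEMA_MODIFY = "SCHEMA_MODIFY"
--
-- # Priority order, highest risk first (rank 0 = highest risk).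
-- _PRIORITY = [
--     EffectClass.NETWORK_TRANSMIT,
--     EffectClass.PERMISSION_CHANGE,
--     EffectClass.INTEGRATION_WIRE,
--     EffectClass.SHELL_EXEC,
--     EffectClass.SCHEMA_MODIFY,
--     EffectClass.WRITE_LOCAL,
--     EffectClass.MODEL_INFERENCE,
--     EffectClass.EXTERNAL_READ,
--     EffectClass.READ_ONLY,
-- ]
--
-- # Each effect tag mapped directly to the rank of its class; unknown tags
-- # rank as SHELL_EXEC (rank 3).
-- _TAG_RANK = {
--     "READ_REPO": 8,
--     "READ_CONFIG": 8,
--     "READ_SECRETS": 8,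
--     "COMPUTE": 6,
--     "WRITE_PATCH": 5,
--     "RUN_TESTS": 3,
--     "BUILD_ARTIFACT": 3,
--     "CREATE_PR": 2,
--     "MERGE": 2,
--     "DEPLOY": 0,
--     "NETWORK_CALL": 0,
--     "SEND_NOTIFICATION": 0,
--     "OTHER": 3,
-- }
--
-- def classify_effects(effects: list[str]) -> EffectClass:
--     """One-pass running-minimum over tag ranks; empty input falls back to READ_ONLY."""
--     best = None
--     for e in effects:
--         r = _TAG_RANK.get(e, 3)
--         if best is None or r < best:
--             best = r
--     return EffectClass.READ_ONLY if best is None else _PRIORITY[best]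
-- ===== Notes on version B (the rewrite author's own statement) =====
-- stated objective: alternative
-- what changed: Replaces A's two-stage set-of-classes build plus scan over the fixed priority list with a single pass keeping the running minimum rank per tag and indexing the priority list once at the end.
import Mathlib
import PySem

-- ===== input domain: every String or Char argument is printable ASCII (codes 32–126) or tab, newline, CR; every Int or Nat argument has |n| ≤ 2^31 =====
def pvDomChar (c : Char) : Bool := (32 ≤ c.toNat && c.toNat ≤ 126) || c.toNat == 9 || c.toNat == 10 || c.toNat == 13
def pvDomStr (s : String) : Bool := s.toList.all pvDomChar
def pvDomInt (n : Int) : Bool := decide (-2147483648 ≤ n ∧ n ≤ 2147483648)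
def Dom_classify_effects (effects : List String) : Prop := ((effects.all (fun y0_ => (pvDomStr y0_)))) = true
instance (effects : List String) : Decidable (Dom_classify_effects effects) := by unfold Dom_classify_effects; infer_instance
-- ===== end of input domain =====

-- B replaces A's set-of-classes + priority-scan with a one-pass running-minimum over tag ranks (alternative decomposition, same cost).

-- ===== PORT A =====
-- EFFECT_TAG_TO_CLASS (EffectClass values are their string values)
def pvTagToClassDict : PySem.Dict String String := PySem.Dict.ofList
  [("READ_REPO", "READ_ONLY"), ("READ_CONFIG", "READ_ONLY"), ("READ_SECRETS", "READ_ONLY"),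
   ("COMPUTE", "MODEL_INFERENCE"), ("WRITE_PATCH", "WRITE_LOCAL"), ("RUN_TESTS", "SHELL_EXEC"),
   ("BUILD_ARTIFACT", "SHELL_EXEC"), ("CREATE_PR", "INTEGRATION_WIRE"), ("MERGE", "INTEGRATION_WIRE"),
   ("DEPLOY", "NETWORK_TRANSMIT"), ("NETWORK_CALL", "NETWORK_TRANSMIT"),
   ("SEND_NOTIFICATION", "NETWORK_TRANSMIT"), ("OTHER", "SHELL_EXEC")]

-- EFFECT_TAG_TO_CLASS.get(e, EffectClass.SHELL_EXEC)
def pvF (e : String) : String := PySem.Dict.getD pvTagToClassDict e "SHELL_EXEC"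

-- the `priority` list of A
def pvPriorityA : List String :=
  ["NETWORK_TRANSMIT", "PERMISSION_CHANGE", "INTEGRATION_WIRE", "SHELL_EXEC", "SCHEMA_MODIFY",
   "WRITE_LOCAL", "MODEL_INFERENCE", "EXTERNAL_READ", "READ_ONLY"]

-- `for p in priority: if p in classes: return p` / `return READ_ONLY`
def pvScanPriority : List String → PySem.Set String → String
  | [], _ => "READ_ONLY"
  | p :: rest, classes => if PySem.Set.contains classes p then p else pvScanPriority rest classes

def classify_effects (effects : List String) : String :=
  pvScanPriority pvPriorityA (PySem.Set.ofList (effects.map pvF))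

-- ===== PORT B =====
-- _TAG_RANK of Source B
def pvTagRankDict : PySem.Dict String Int := PySem.Dict.ofList
  [("READ_REPO", 8), ("READ_CONFIG", 8), ("READ_SECRETS", 8),
   ("COMPUTE", 6), ("WRITE_PATCH", 5), ("RUN_TESTS", 3),
   ("BUILD_ARTIFACT", 3), ("CREATE_PR", 2), ("MERGE", 2),
   ("DEPLOY", 0), ("NETWORK_CALL", 0),
   ("SEND_NOTIFICATION", 0), ("OTHER", 3)]

-- _TAG_RANK.get(e, 3)
def pvRank (e : String) : Int := PySem.Dict.getD pvTagRankDict e 3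

-- _PRIORITY of Source B
def pvPriorityB : List String :=
  ["NETWORK_TRANSMIT", "PERMISSION_CHANGE", "INTEGRATION_WIRE", "SHELL_EXEC", "SCHEMA_MODIFY",
   "WRITE_LOCAL", "MODEL_INFERENCE", "EXTERNAL_READ", "READ_ONLY"]

-- loop body: `if best is None or r < best: best = r`
def pvStep (best : Option Int) (e : String) : Option Int :=
  match best with
  | none => some (pvRank e)
  | some b => if pvRank e < b then some (pvRank e) else some b

def classify_effects_alt (effects : List String) : String :=
  match effects.foldl pvStep none with
  | none => "READ_ONLY"
  | some b => (PySem.List.pyGet? pvPriorityB b).getD ""  -- _PRIORITY[best]; b is always 0..8 so in range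

-- ===== PRECONDITION & SPEC =====
def Spec_classify_effects (effects : List String) (out : String) : Prop := out = classify_effects_alt effects
instance (effects : List String) (out : String) : Decidable (Spec_classify_effects effects out) := by unfold Spec_classify_effects; infer_instance

-- ===== CLAIM (what is proved, stated in full; the proofs are below) =====
def Claim_equal_classify_effects : Prop := ∀ (effects : List String), Dom_classify_effects effects → Spec_classify_effects effects (classify_effects effects)

-- ===== LEMMAS AND PROOFS =====

-- rank → class-name correspondence between the two tables
def pvRankToClass (r : Int) : String :=
  if r = 0 then "NETWORK_TRANSMIT" else if r = 2 then "INTEGRATION_WIRE"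
  else if r = 3 then "SHELL_EXEC" else if r = 5 then "WRITE_LOCAL"
  else if r = 6 then "MODEL_INFERENCE" else "READ_ONLY"

-- the two literal tables, reduced from Dict.ofList to their item lists
lemma pvTagToClassDict_eq : pvTagToClassDict = PySem.Dict.mk
    [("READ_REPO", "READ_ONLY"), ("READ_CONFIG", "READ_ONLY"), ("READ_SECRETS", "READ_ONLY"),
     ("COMPUTE", "MODEL_INFERENCE"), ("WRITE_PATCH", "WRITE_LOCAL"), ("RUN_TESTS", "SHELL_EXEC"),
     ("BUILD_ARTIFACT", "SHELL_EXEC"), ("CREATE_PR", "INTEGRATION_WIRE"), ("MERGE", "INTEGRATION_WIRE"),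
     ("DEPLOY", "NETWORK_TRANSMIT"), ("NETWORK_CALL", "NETWORK_TRANSMIT"),
     ("SEND_NOTIFICATION", "NETWORK_TRANSMIT"), ("OTHER", "SHELL_EXEC")] := rfl

lemma pvTagRankDict_eq : pvTagRankDict = PySem.Dict.mk
    [("READ_REPO", 8), ("READ_CONFIG", 8), ("READ_SECRETS", 8),
     ("COMPUTE", 6), ("WRITE_PATCH", 5), ("RUN_TESTS", 3),
     ("BUILD_ARTIFACT", 3), ("CREATE_PR", 2), ("MERGE", 2),
     ("DEPLOY", 0), ("NETWORK_CALL", 0),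
     ("SEND_NOTIFICATION", 0), ("OTHER", 3)] := rfl

set_option maxHeartbeats 2000000 in
lemma pvF_eq (e : String) : pvF e = pvRankToClass (pvRank e) := by
  simp only [pvF, pvRank, pvTagToClassDict_eq, pvTagRankDict_eq, PySem.Dict.getD,
    PySem.Dict.get?_mk_cons,
    show (PySem.Dict.mk ([] : List (String × String))).get? e = none from rfl,
    show (PySem.Dict.mk ([] : List (String × Int))).get? e = none from rfl]
  by_cases h0 : ("READ_REPO" == e) = true
  · simp only [if_pos h0]; rfl
  simp only [if_neg h0]
  by_cases h1 : ("READ_CONFIG" == e) = true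
  · simp only [if_pos h1]; rfl
  simp only [if_neg h1]
  by_cases h2 : ("READ_SECRETS" == e) = true
  · simp only [if_pos h2]; rfl
  simp only [if_neg h2]
  by_cases h3 : ("COMPUTE" == e) = true
  · simp only [if_pos h3]; rfl
  simp only [if_neg h3]
  by_cases h4 : ("WRITE_PATCH" == e) = true
  · simp only [if_pos h4]; rfl
  simp only [if_neg h4]
  by_cases h5 : ("RUN_TESTS" == e) = true
  · simp only [if_pos h5]; rfl
  simp only [if_neg h5]
  by_cases h6 : ("BUILD_ARTIFACT" == e) = true
  · simp only [if_pos h6]; rfl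
  simp only [if_neg h6]
  by_cases h7 : ("CREATE_PR" == e) = true
  · simp only [if_pos h7]; rfl
  simp only [if_neg h7]
  by_cases h8 : ("MERGE" == e) = true
  · simp only [if_pos h8]; rfl
  simp only [if_neg h8]
  by_cases h9 : ("DEPLOY" == e) = true
  · simp only [if_pos h9]; rfl
  simp only [if_neg h9]
  by_cases h10 : ("NETWORK_CALL" == e) = true
  · simp only [if_pos h10]; rfl
  simp only [if_neg h10]
  by_cases h11 : ("SEND_NOTIFICATION" == e) = true
  · simp only [if_pos h11]; rfl
  simp only [if_neg h11]
  by_cases h12 : ("OTHER" == e) = true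
  · simp only [if_pos h12]; rfl
  simp only [if_neg h12]
  rfl

set_option maxHeartbeats 2000000 in
lemma pvRank_cases (e : String) :
    pvRank e = 0 ∨ pvRank e = 2 ∨ pvRank e = 3 ∨ pvRank e = 5 ∨ pvRank e = 6 ∨ pvRank e = 8 := by
  simp only [pvRank, pvTagRankDict_eq, PySem.Dict.getD,
    PySem.Dict.get?_mk_cons,
    show (PySem.Dict.mk ([] : List (String × Int))).get? e = none from rfl]
  by_cases h0 : ("READ_REPO" == e) = true
  · simp only [if_pos h0]; decide
  simp only [if_neg h0]
  by_cases h1 : ("READ_CONFIG" == e) = true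
  · simp only [if_pos h1]; decide
  simp only [if_neg h1]
  by_cases h2 : ("READ_SECRETS" == e) = true
  · simp only [if_pos h2]; decide
  simp only [if_neg h2]
  by_cases h3 : ("COMPUTE" == e) = true
  · simp only [if_pos h3]; decide
  simp only [if_neg h3]
  by_cases h4 : ("WRITE_PATCH" == e) = true
  · simp only [if_pos h4]; decide
  simp only [if_neg h4]
  by_cases h5 : ("RUN_TESTS" == e) = true
  · simp only [if_pos h5]; decide
  simp only [if_neg h5]
  by_cases h6 : ("BUILD_ARTIFACT" == e) = true
  · simp only [if_pos h6]; decide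
  simp only [if_neg h6]
  by_cases h7 : ("CREATE_PR" == e) = true
  · simp only [if_pos h7]; decide
  simp only [if_neg h7]
  by_cases h8 : ("MERGE" == e) = true
  · simp only [if_pos h8]; decide
  simp only [if_neg h8]
  by_cases h9 : ("DEPLOY" == e) = true
  · simp only [if_pos h9]; decide
  simp only [if_neg h9]
  by_cases h10 : ("NETWORK_CALL" == e) = true
  · simp only [if_pos h10]; decide
  simp only [if_neg h10]
  by_cases h11 : ("SEND_NOTIFICATION" == e) = true
  · simp only [if_pos h11]; decide
  simp only [if_neg h11]
  by_cases h12 : ("OTHER" == e) = true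
  · simp only [if_pos h12]; decide
  simp only [if_neg h12]
  decide

lemma pvContains_iff (effects : List String) (p : String) :
    PySem.Set.contains (PySem.Set.ofList (effects.map pvF)) p = true ↔
      ∃ e ∈ effects, pvRankToClass (pvRank e) = p := by
  rw [PySem.Set.contains_iff, PySem.Set.mem_ofList, List.mem_map]
  constructor
  · rintro ⟨e, he, h⟩; exact ⟨e, he, by rw [← pvF_eq, h]⟩
  · rintro ⟨e, he, h⟩; exact ⟨e, he, by rw [pvF_eq, h]⟩

lemma pvFoldl_some (xs : List String) (b : Int) :
    xs.foldl pvStep (some b) = some (xs.foldl (fun acc e => min acc (pvRank e)) b) := by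
  induction xs generalizing b with
  | nil => rfl
  | cons x xs ih =>
    simp only [List.foldl_cons, pvStep]
    by_cases h : pvRank x < b
    · rw [if_pos h, ih, show min b (pvRank x) = pvRank x by omega]
    · rw [if_neg h, ih, show min b (pvRank x) = b by omega]

lemma pvMin_le (xs : List String) (b : Int) :
    xs.foldl (fun acc e => min acc (pvRank e)) b ≤ b ∧
      ∀ e ∈ xs, xs.foldl (fun acc e => min acc (pvRank e)) b ≤ pvRank e := by
  induction xs generalizing b with
  | nil => simp
  | cons x xs ih =>
    simp only [List.foldl_cons, List.mem_cons]
    refine ⟨le_trans (ih _).1 (by omega), ?_⟩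
    rintro e (rfl | he)
    · exact le_trans (ih _).1 (by omega)
    · exact (ih _).2 e he

lemma pvMin_mem (xs : List String) (b : Int) :
    xs.foldl (fun acc e => min acc (pvRank e)) b = b ∨
      ∃ e ∈ xs, xs.foldl (fun acc e => min acc (pvRank e)) b = pvRank e := by
  induction xs generalizing b with
  | nil => simp
  | cons x xs ih =>
    simp only [List.foldl_cons, List.mem_cons]
    rcases ih (min b (pvRank x)) with h | ⟨e, he, h⟩
    · by_cases hb : b ≤ pvRank x
      · left; rw [h]; omega
      · right; exact ⟨x, Or.inl rfl, by rw [h]; omega⟩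
    · right; exact ⟨e, Or.inr he, h⟩

-- ===== VERDICT (by name: the statement is the Claim_ definition above) =====
theorem classify_effects_spec : Claim_equal_classify_effects := by
  intro effects _
  unfold Spec_classify_effects
  cases effects with
  | nil => decide
  | cons x xs =>
    have hB : classify_effects_alt (x :: xs) =
        (PySem.List.pyGet? pvPriorityB (xs.foldl (fun acc e => min acc (pvRank e)) (pvRank x))).getD "" := by
      simp only [classify_effects_alt, List.foldl_cons]
      rw [show pvStep none x = some (pvRank x) from rfl, pvFoldl_some]
    rw [hB]
    set m := xs.foldl (fun acc e => min acc (pvRank e)) (pvRank x) with hmdef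
    have hle := pvMin_le xs (pvRank x)
    have hle' : ∀ e ∈ x :: xs, m ≤ pvRank e := by
      intro e he
      rcases List.mem_cons.mp he with rfl | he
      · exact hle.1
      · exact hle.2 e he
    have hmem : ∃ e ∈ x :: xs, m = pvRank e := by
      rcases pvMin_mem xs (pvRank x) with h | ⟨e, he, h⟩
      · exact ⟨x, List.mem_cons_self, h⟩
      · exact ⟨e, List.mem_cons_of_mem _ he, h⟩
    obtain ⟨e0, he0, hme⟩ := hmem
    have hTrue : PySem.Set.contains (PySem.Set.ofList ((x :: xs).map pvF)) (pvRankToClass m) = true :=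
      (pvContains_iff (x :: xs) (pvRankToClass m)).2 ⟨e0, he0, by rw [← hme]⟩
    have hA : ∀ p : String,
        (∀ r : Int, (r = 0 ∨ r = 2 ∨ r = 3 ∨ r = 5 ∨ r = 6 ∨ r = 8) → m ≤ r → pvRankToClass r ≠ p) →
        PySem.Set.contains (PySem.Set.ofList ((x :: xs).map pvF)) p = false := by
      intro p hp
      rw [Bool.eq_false_iff]
      intro hc
      obtain ⟨e, he, hcE⟩ := (pvContains_iff (x :: xs) p).1 hc
      exact hp (pvRank e) (pvRank_cases e) (hle' e he) hcE
    have hmset : m = 0 ∨ m = 2 ∨ m = 3 ∨ m = 5 ∨ m = 6 ∨ m = 8 := by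
      rcases pvRank_cases e0 with h|h|h|h|h|h <;> omega
    simp only [classify_effects]
    rcases hmset with hm'|hm'|hm'|hm'|hm'|hm'
    · -- m = 0
      have hT := hTrue
      rw [hm'] at hT
      rw [show pvRankToClass (0 : Int) = "NETWORK_TRANSMIT" from rfl] at hT
      rw [hm']
      simp only [pvPriorityA, pvScanPriority, Bool.false_eq_true, eq_self_iff_true, if_false, if_true, hT]
      rfl
    · -- m = 2
      have f0 : PySem.Set.contains (PySem.Set.ofList ((x :: xs).map pvF)) "NETWORK_TRANSMIT" = false :=
        hA _ (by intro r hr hmr; rcases hr with rfl|rfl|rfl|rfl|rfl|rfl <;> simp [pvRankToClass] <;> omega)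
      have f1 : PySem.Set.contains (PySem.Set.ofList ((x :: xs).map pvF)) "PERMISSION_CHANGE" = false :=
        hA _ (by intro r hr hmr; rcases hr with rfl|rfl|rfl|rfl|rfl|rfl <;> simp [pvRankToClass] <;> omega)
      have hT := hTrue
      rw [hm'] at hT
      rw [show pvRankToClass (2 : Int) = "INTEGRATION_WIRE" from rfl] at hT
      rw [hm']
      simp only [pvPriorityA, pvScanPriority, Bool.false_eq_true, eq_self_iff_true, if_false, if_true, f0, f1, hT]
      rfl
    · -- m = 3
      have f0 : PySem.Set.contains (PySem.Set.ofList ((x :: xs).map pvF)) "NETWORK_TRANSMIT" = false :=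
        hA _ (by intro r hr hmr; rcases hr with rfl|rfl|rfl|rfl|rfl|rfl <;> simp [pvRankToClass] <;> omega)
      have f1 : PySem.Set.contains (PySem.Set.ofList ((x :: xs).map pvF)) "PERMISSION_CHANGE" = false :=
        hA _ (by intro r hr hmr; rcases hr with rfl|rfl|rfl|rfl|rfl|rfl <;> simp [pvRankToClass] <;> omega)
      have f2 : PySem.Set.contains (PySem.Set.ofList ((x :: xs).map pvF)) "INTEGRATION_WIRE" = false :=
        hA _ (by intro r hr hmr; rcases hr with rfl|rfl|rfl|rfl|rfl|rfl <;> simp [pvRankToClass] <;> omega)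
      have hT := hTrue
      rw [hm'] at hT
      rw [show pvRankToClass (3 : Int) = "SHELL_EXEC" from rfl] at hT
      rw [hm']
      simp only [pvPriorityA, pvScanPriority, Bool.false_eq_true, eq_self_iff_true, if_false, if_true, f0, f1, f2, hT]
      rfl
    · -- m = 5
      have f0 : PySem.Set.contains (PySem.Set.ofList ((x :: xs).map pvF)) "NETWORK_TRANSMIT" = false :=
        hA _ (by intro r hr hmr; rcases hr with rfl|rfl|rfl|rfl|rfl|rfl <;> simp [pvRankToClass] <;> omega)
      have f1 : PySem.Set.contains (PySem.Set.ofList ((x :: xs).map pvF)) "PERMISSION_CHANGE" = false :=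
        hA _ (by intro r hr hmr; rcases hr with rfl|rfl|rfl|rfl|rfl|rfl <;> simp [pvRankToClass] <;> omega)
      have f2 : PySem.Set.contains (PySem.Set.ofList ((x :: xs).map pvF)) "INTEGRATION_WIRE" = false :=
        hA _ (by intro r hr hmr; rcases hr with rfl|rfl|rfl|rfl|rfl|rfl <;> simp [pvRankToClass] <;> omega)
      have f3 : PySem.Set.contains (PySem.Set.ofList ((x :: xs).map pvF)) "SHELL_EXEC" = false :=
        hA _ (by intro r hr hmr; rcases hr with rfl|rfl|rfl|rfl|rfl|rfl <;> simp [pvRankToClass] <;> omega)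
      have f4 : PySem.Set.contains (PySem.Set.ofList ((x :: xs).map pvF)) "SCHEMA_MODIFY" = false :=
        hA _ (by intro r hr hmr; rcases hr with rfl|rfl|rfl|rfl|rfl|rfl <;> simp [pvRankToClass] <;> omega)
      have hT := hTrue
      rw [hm'] at hT
      rw [show pvRankToClass (5 : Int) = "WRITE_LOCAL" from rfl] at hT
      rw [hm']
      simp only [pvPriorityA, pvScanPriority, Bool.false_eq_true, eq_self_iff_true, if_false, if_true, f0, f1, f2, f3, f4, hT]
      rfl
    · -- m = 6
      have f0 : PySem.Set.contains (PySem.Set.ofList ((x :: xs).map pvF)) "NETWORK_TRANSMIT" = false :=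
        hA _ (by intro r hr hmr; rcases hr with rfl|rfl|rfl|rfl|rfl|rfl <;> simp [pvRankToClass] <;> omega)
      have f1 : PySem.Set.contains (PySem.Set.ofList ((x :: xs).map pvF)) "PERMISSION_CHANGE" = false :=
        hA _ (by intro r hr hmr; rcases hr with rfl|rfl|rfl|rfl|rfl|rfl <;> simp [pvRankToClass] <;> omega)
      have f2 : PySem.Set.contains (PySem.Set.ofList ((x :: xs).map pvF)) "INTEGRATION_WIRE" = false :=
        hA _ (by intro r hr hmr; rcases hr with rfl|rfl|rfl|rfl|rfl|rfl <;> simp [pvRankToClass] <;> omega)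
      have f3 : PySem.Set.contains (PySem.Set.ofList ((x :: xs).map pvF)) "SHELL_EXEC" = false :=
        hA _ (by intro r hr hmr; rcases hr with rfl|rfl|rfl|rfl|rfl|rfl <;> simp [pvRankToClass] <;> omega)
      have f4 : PySem.Set.contains (PySem.Set.ofList ((x :: xs).map pvF)) "SCHEMA_MODIFY" = false :=
        hA _ (by intro r hr hmr; rcases hr with rfl|rfl|rfl|rfl|rfl|rfl <;> simp [pvRankToClass] <;> omega)
      have f5 : PySem.Set.contains (PySem.Set.ofList ((x :: xs).map pvF)) "WRITE_LOCAL" = false :=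
        hA _ (by intro r hr hmr; rcases hr with rfl|rfl|rfl|rfl|rfl|rfl <;> simp [pvRankToClass] <;> omega)
      have hT := hTrue
      rw [hm'] at hT
      rw [show pvRankToClass (6 : Int) = "MODEL_INFERENCE" from rfl] at hT
      rw [hm']
      simp only [pvPriorityA, pvScanPriority, Bool.false_eq_true, eq_self_iff_true, if_false, if_true, f0, f1, f2, f3, f4, f5, hT]
      rfl
    · -- m = 8
      have f0 : PySem.Set.contains (PySem.Set.ofList ((x :: xs).map pvF)) "NETWORK_TRANSMIT" = false :=
        hA _ (by intro r hr hmr; rcases hr with rfl|rfl|rfl|rfl|rfl|rfl <;> simp [pvRankToClass] <;> omega)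
      have f1 : PySem.Set.contains (PySem.Set.ofList ((x :: xs).map pvF)) "PERMISSION_CHANGE" = false :=
        hA _ (by intro r hr hmr; rcases hr with rfl|rfl|rfl|rfl|rfl|rfl <;> simp [pvRankToClass] <;> omega)
      have f2 : PySem.Set.contains (PySem.Set.ofList ((x :: xs).map pvF)) "INTEGRATION_WIRE" = false :=
        hA _ (by intro r hr hmr; rcases hr with rfl|rfl|rfl|rfl|rfl|rfl <;> simp [pvRankToClass] <;> omega)
      have f3 : PySem.Set.contains (PySem.Set.ofList ((x :: xs).map pvF)) "SHELL_EXEC" = false :=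
        hA _ (by intro r hr hmr; rcases hr with rfl|rfl|rfl|rfl|rfl|rfl <;> simp [pvRankToClass] <;> omega)
      have f4 : PySem.Set.contains (PySem.Set.ofList ((x :: xs).map pvF)) "SCHEMA_MODIFY" = false :=
        hA _ (by intro r hr hmr; rcases hr with rfl|rfl|rfl|rfl|rfl|rfl <;> simp [pvRankToClass] <;> omega)
      have f5 : PySem.Set.contains (PySem.Set.ofList ((x :: xs).map pvF)) "WRITE_LOCAL" = false :=
        hA _ (by intro r hr hmr; rcases hr with rfl|rfl|rfl|rfl|rfl|rfl <;> simp [pvRankToClass] <;> omega)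
      have f6 : PySem.Set.contains (PySem.Set.ofList ((x :: xs).map pvF)) "MODEL_INFERENCE" = false :=
        hA _ (by intro r hr hmr; rcases hr with rfl|rfl|rfl|rfl|rfl|rfl <;> simp [pvRankToClass] <;> omega)
      have f7 : PySem.Set.contains (PySem.Set.ofList ((x :: xs).map pvF)) "EXTERNAL_READ" = false :=
        hA _ (by intro r hr hmr; rcases hr with rfl|rfl|rfl|rfl|rfl|rfl <;> simp [pvRankToClass] <;> omega)
      have hT := hTrue
      rw [hm'] at hT
      rw [show pvRankToClass (8 : Int) = "READ_ONLY" from rfl] at hT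
      rw [hm']
      simp only [pvPriorityA, pvScanPriority, Bool.false_eq_true, eq_self_iff_true, if_false, if_true, f0, f1, f2, f3, f4, f5, f6, f7, hT]
      rfl
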